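-- pv_equiv track=rewrite | github.com/pyaythar-k/sam-plugin | skills/sam-develop/scripts/verify_coverage.py | get_coverage_from_registry
-- ===== SOURCE A (Python) =====
-- from typing import List, Tuple, Dict, Any, Optional
--
-- def get_coverage_from_registry(registry: Dict[str, Any]) -> Tuple[int, int, List[str]]:
--     """
--     Get coverage information from TASKS.json registry.
--
--     Returns:
--         Tuple of (completed_count, total_count, list_of_uncompleted_tasks)
--     """
--     total_tasks = 0
--     completed_tasks = 0
--     uncompleted_tasks = []
--
--     for phase in registry.get('phases', []):
--         for task in phase.get('tasks', []):
--             total_tasks += 1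
--             if task.get('status') == 'completed':
--                 completed_tasks += 1
--             else:
--                 uncompleted_tasks.append(f"{task.get('task_id')}: {task.get('title', 'Unknown')}")
--
--     return completed_tasks, total_tasks, uncompleted_tasks
-- ===== SOURCE B (Python) =====
-- from typing import List, Tuple, Dict, Any
--
-- def get_coverage_from_registry(registry: Dict[str, Any]) -> Tuple[int, int, List[str]]:
--     # Flatten the registry into one list of task dicts, then three separate passes.
--     flat = []
--     for phase in registry.get('phases', []):
--         flat.extend(phase.get('tasks', []))
--     total = len(flat)
--     completed = sum(1 for t in flat if t.get('status') == 'completed')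
--     uncompleted = [f"{t.get('task_id')}: {t.get('title', 'Unknown')}"
--                    for t in flat if t.get('status') != 'completed']
--     return completed, total, uncompleted
-- ===== Notes on version B (the rewrite author's own statement) =====
-- stated objective: simpler
-- what changed: B first flattens the nested phases/tasks structure into one list of task dicts, then computes total, completed and the uncompleted lines in three separate passes instead of A's single combined nested traversal with three running accumulators.
import Mathlib
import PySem

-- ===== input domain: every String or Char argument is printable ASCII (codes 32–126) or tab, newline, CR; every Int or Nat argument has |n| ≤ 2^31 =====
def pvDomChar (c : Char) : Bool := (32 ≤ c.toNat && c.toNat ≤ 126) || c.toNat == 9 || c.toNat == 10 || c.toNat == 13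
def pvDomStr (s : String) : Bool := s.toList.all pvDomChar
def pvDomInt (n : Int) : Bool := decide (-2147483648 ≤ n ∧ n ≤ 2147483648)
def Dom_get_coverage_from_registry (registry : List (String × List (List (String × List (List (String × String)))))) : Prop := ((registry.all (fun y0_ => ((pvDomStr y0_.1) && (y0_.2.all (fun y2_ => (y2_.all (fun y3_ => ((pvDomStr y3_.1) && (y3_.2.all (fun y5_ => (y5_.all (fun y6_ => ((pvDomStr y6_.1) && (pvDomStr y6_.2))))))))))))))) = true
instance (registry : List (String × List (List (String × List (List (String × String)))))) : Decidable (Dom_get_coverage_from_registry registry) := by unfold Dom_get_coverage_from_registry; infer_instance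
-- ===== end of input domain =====

-- B flattens the nested phases/tasks registry into one list and computes the three results in
-- separate passes, instead of A's single nested traversal with three accumulators (objective: simpler).


-- ===== PORT A =====
-- f"{task.get('task_id')}: {task.get('title', 'Unknown')}"  (missing task_id prints as "None")
def pvLineA (task : List (String × String)) : String :=
  ((task.lookup "task_id").getD "None") ++ ": " ++ ((task.lookup "title").getD "Unknown")

def get_coverage_from_registry (registry : List (String × List (List (String × List (List (String × String)))))) : Int × Int × List String :=
  ((registry.lookup "phases").getD []).foldl
    (fun st phase =>
      ((phase.lookup "tasks").getD []).foldl
        (fun st task =>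
          if task.lookup "status" == some "completed" then
            (st.1 + 1, st.2.1 + 1, st.2.2)
          else
            (st.1, st.2.1 + 1, st.2.2 ++ [pvLineA task]))
        st)
    ((0 : Int), (0 : Int), ([] : List String))

-- ===== PORT B =====
def pvLineB (task : List (String × String)) : String :=
  ((task.lookup "task_id").getD "None") ++ ": " ++ ((task.lookup "title").getD "Unknown")

def get_coverage_from_registry_alt (registry : List (String × List (List (String × List (List (String × String)))))) : Int × Int × List String :=
  let flat := ((registry.lookup "phases").getD []).foldl
    (fun acc phase => acc ++ (phase.lookup "tasks").getD []) []
  let total : Int := flat.length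
  let completed : Int := flat.countP (fun t => t.lookup "status" == some "completed")
  let uncompleted := (flat.filter (fun t => !(t.lookup "status" == some "completed"))).map pvLineB
  (completed, total, uncompleted)

-- ===== PRECONDITION & SPEC =====
def Spec_get_coverage_from_registry (registry : List (String × List (List (String × List (List (String × String)))))) (out : Int × Int × List String) : Prop := out = get_coverage_from_registry_alt registry
instance (registry : List (String × List (List (String × List (List (String × String)))))) (out : Int × Int × List String) : Decidable (Spec_get_coverage_from_registry registry out) := by unfold Spec_get_coverage_from_registry; infer_instance

-- ===== CLAIM (what is proved, stated in full; the proofs are below) =====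
def Claim_equal_get_coverage_from_registry : Prop := ∀ (registry : List (String × List (List (String × List (List (String × String)))))), Dom_get_coverage_from_registry registry → Spec_get_coverage_from_registry registry (get_coverage_from_registry registry)

-- ===== LEMMAS AND PROOFS =====

-- A's inner loop over one phase's task list, from an arbitrary running state.
theorem pv_inner (tasks : List (List (String × String))) (c t : Int) (u : List String) :
    tasks.foldl
      (fun st task =>
        if task.lookup "status" == some "completed" then
          (st.1 + 1, st.2.1 + 1, st.2.2)
        else
          (st.1, st.2.1 + 1, st.2.2 ++ [pvLineA task]))
      (c, t, u)
    = (c + tasks.countP (fun x => x.lookup "status" == some "completed"),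
       t + tasks.length,
       u ++ (tasks.filter (fun x => !(x.lookup "status" == some "completed"))).map pvLineA) := by
  induction tasks generalizing c t u with
  | nil => simp
  | cons a l ih =>
    simp only [List.foldl_cons]
    by_cases h : (a.lookup "status" == some "completed") = true
    · rw [if_pos h, ih]
      refine Prod.ext ?_ (Prod.ext ?_ ?_)
      · simp [h]; ring
      · simp; ring
      · simp [h]
    · rw [if_neg h, ih]
      refine Prod.ext ?_ (Prod.ext ?_ ?_)
      · simp [h]
      · simp; ring
      · simp [h]

-- A's outer loop, expressed through the flattened task list.
theorem pv_outer (phases : List (List (String × List (List (String × String))))) (c t : Int) (u : List String) :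
    phases.foldl
      (fun st phase =>
        ((phase.lookup "tasks").getD []).foldl
          (fun st task =>
            if task.lookup "status" == some "completed" then
              (st.1 + 1, st.2.1 + 1, st.2.2)
            else
              (st.1, st.2.1 + 1, st.2.2 ++ [pvLineA task]))
          st)
      (c, t, u)
    = (c + (phases.flatMap (fun ph => (ph.lookup "tasks").getD [])).countP
            (fun x => x.lookup "status" == some "completed"),
       t + (phases.flatMap (fun ph => (ph.lookup "tasks").getD [])).length,
       u ++ ((phases.flatMap (fun ph => (ph.lookup "tasks").getD [])).filter
              (fun x => !(x.lookup "status" == some "completed"))).map pvLineA) := by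
  induction phases generalizing c t u with
  | nil => simp
  | cons a l ih =>
    simp only [List.foldl_cons, pv_inner, ih, List.flatMap_cons, List.countP_append,
      List.length_append, List.filter_append, List.map_append, List.append_assoc]
    refine Prod.ext ?_ (Prod.ext ?_ rfl) <;> push_cast <;> ring

-- ===== VERDICT (by name: the statement is the Claim_ definition above) =====
theorem get_coverage_from_registry_spec : Claim_equal_get_coverage_from_registry := by
  intro registry _
  unfold Spec_get_coverage_from_registry get_coverage_from_registry get_coverage_from_registry_alt
  rw [pv_outer, PySem.List.foldl_append_eq_flatMap]
  simp [pvLineA, pvLineB]
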